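-- pv_equiv track=rewrite | github.com/b1est/sromlabs | func.py | lcmp
-- ===== SOURCE A (Python) =====
-- def lcmp(a, b):
--
--    if len(a) > len(b):
--       return 1
--    elif len(a) < len(b):
--       return -1
--    else:
--       for i in range(len(b)):
--          if a[i] > b[i]:
--             return 1
--          if a[i] < b[i]:
--             return -1
--       return 0
-- ===== SOURCE B (Python) =====
-- def lcmp(a, b):
--     # One simultaneous pass, no len(): remember the first elementwise difference;
--     # if one iterator runs out first, that length verdict wins.
--     ia, ib = iter(a), iter(b)
--     sentinel = object()
--     lex = 0
--     while True:
--         x = next(ia, sentinel)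
--         y = next(ib, sentinel)
--         if x is sentinel and y is sentinel:
--             return lex
--         if x is sentinel:
--             return -1
--         if y is sentinel:
--             return 1
--         if lex == 0:
--             lex = 1 if x > y else (-1 if x < y else 0)
-- ===== Notes on version B (the rewrite author's own statement) =====
-- stated objective: alternative
-- what changed: Replaces the length-first branches plus index loop by a single simultaneous pass over both iterators with a deferred first-difference accumulator; lengths are never computed, exhaustion of one iterator decides instead.
import Mathlib
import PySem

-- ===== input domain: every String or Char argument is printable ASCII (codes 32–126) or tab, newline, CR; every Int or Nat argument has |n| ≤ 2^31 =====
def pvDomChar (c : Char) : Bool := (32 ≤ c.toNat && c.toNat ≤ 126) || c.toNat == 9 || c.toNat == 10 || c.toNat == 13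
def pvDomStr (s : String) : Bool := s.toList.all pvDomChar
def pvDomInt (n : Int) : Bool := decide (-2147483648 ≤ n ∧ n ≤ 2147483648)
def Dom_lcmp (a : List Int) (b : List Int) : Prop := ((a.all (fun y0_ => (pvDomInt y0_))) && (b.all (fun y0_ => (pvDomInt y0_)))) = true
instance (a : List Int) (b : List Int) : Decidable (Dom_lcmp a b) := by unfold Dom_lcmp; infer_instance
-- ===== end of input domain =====

-- B replaces A's length-first branches and index loop by one simultaneous pass with a
-- deferred first-difference accumulator (lengths never computed); objective: alternative.

-- ===== PORT A =====
-- A's for-loop over range(len(b)) indexing a[i], b[i]: structural recursion over both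
-- lists (only reached when the lengths are equal, where this is exact)
def lcmpLoop (a : List Int) (b : List Int) : Int :=
  match a, b with
  | x :: xs, y :: ys =>
      if x > y then 1
      else if x < y then -1
      else lcmpLoop xs ys
  | _, _ => 0

def lcmp (a : List Int) (b : List Int) : Int :=
  if a.length > b.length then 1
  else if a.length < b.length then -1
  else lcmpLoop a b

-- ===== PORT B =====
-- B's while-loop: both iterators advanced together, `lex` holds the first elementwise
-- difference seen; exhaustion of one side returns the length verdict immediately.
def lcmpGo (a : List Int) (b : List Int) (lex : Int) : Int :=
  match a, b with
  | [], [] => lex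
  | [], _ :: _ => -1
  | _ :: _, [] => 1
  | x :: xs, y :: ys =>
      lcmpGo xs ys (if lex == 0 then (if x > y then 1 else if x < y then -1 else 0) else lex)

def lcmp_alt (a : List Int) (b : List Int) : Int := lcmpGo a b 0

-- ===== PRECONDITION & SPEC =====
def Spec_lcmp (a : List Int) (b : List Int) (out : Int) : Prop := out = lcmp_alt a b
instance (a : List Int) (b : List Int) (out : Int) : Decidable (Spec_lcmp a b out) := by unfold Spec_lcmp; infer_instance

-- ===== CLAIM (what is proved, stated in full; the proofs are below) =====
def Claim_equal_lcmp : Prop := ∀ (a : List Int) (b : List Int), Dom_lcmp a b → Spec_lcmp a b (lcmp a b)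

-- ===== LEMMAS AND PROOFS =====
-- characterisation of B's loop: length verdict first, else the accumulator, else A's loop
theorem lcmpGo_eq (a : List Int) : ∀ (b : List Int) (lex : Int),
    lcmpGo a b lex =
      if a.length > b.length then 1
      else if a.length < b.length then -1
      else if lex = 0 then lcmpLoop a b else lex := by
  induction a with
  | nil =>
    intro b lex
    cases b <;> simp [lcmpGo, lcmpLoop]
  | cons x xs ih =>
    intro b lex
    cases b with
    | nil => simp [lcmpGo]
    | cons y ys =>
      simp only [lcmpGo, ih, List.length_cons, Nat.add_lt_add_iff_right, gt_iff_lt]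
      by_cases hl : ys.length < xs.length
      · simp [hl]
      · by_cases hl' : xs.length < ys.length
        · simp [hl, hl']
        · simp only [hl, hl', if_false]
          by_cases h0 : lex = 0
          · subst h0
            simp only [beq_self_eq_true, if_true, lcmpLoop]
            rcases lt_trichotomy x y with h | h | h
            · simp [h, not_lt.mpr h.le]
            · subst h; simp
            · simp [h, not_lt.mpr h.le]
          · simp [h0, beq_iff_eq]

-- ===== VERDICT (by name: the statement is the Claim_ definition above) =====
theorem lcmp_spec : Claim_equal_lcmp := by
  intro a b _
  unfold Spec_lcmp lcmp lcmp_alt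
  rw [lcmpGo_eq]
  simp
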